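-- pv_equiv track=rewrite | github.com/rfoxinter/Python | pdf_toolkit/scripts/mult.py | ord2land
-- ===== SOURCE A (Python) =====
-- def ord2land(n: int) -> range:
--     def aux(x):
--         if x % 4 == 1:
--             return x + 1
--         elif x % 4 == 2:
--             return x - 1
--         return x
--     return [aux(i) for i in range((n + 3) // 4 * 4)]
-- ===== SOURCE B (Python) =====
-- def ord2land(n: int) -> range:
--     out = []
--     for k in range((n + 3) // 4 * 4 // 4):
--         out.extend([4 * k, 4 * k + 2, 4 * k + 1, 4 * k + 3])
--     return out
-- ===== Notes on version B (the rewrite author's own statement) =====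
-- stated objective: simpler
-- what changed: B builds the output one permuted quad block at a time, instead of mapping a per-index helper that tests each index's residue class.
import Mathlib
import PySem

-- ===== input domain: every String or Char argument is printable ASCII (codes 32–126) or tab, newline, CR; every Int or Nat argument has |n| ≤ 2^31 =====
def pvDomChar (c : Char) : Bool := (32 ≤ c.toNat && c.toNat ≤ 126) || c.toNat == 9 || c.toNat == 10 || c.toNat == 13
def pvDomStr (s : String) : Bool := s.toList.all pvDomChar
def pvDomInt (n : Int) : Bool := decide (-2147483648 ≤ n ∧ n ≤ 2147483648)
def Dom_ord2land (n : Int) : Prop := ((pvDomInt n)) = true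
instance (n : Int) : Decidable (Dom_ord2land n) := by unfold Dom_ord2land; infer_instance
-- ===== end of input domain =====

-- B builds the output one permuted quad block at a time instead of mapping a per-index residue-testing helper (objective: simpler).

-- ===== PORT A =====
-- Python A's inner helper 'aux'
def ord2land_aux (x : Int) : Int :=
  if PySem.Int.mod x 4 = 1 then x + 1
  else if PySem.Int.mod x 4 = 2 then x - 1
  else x

def ord2land (n : Int) : List Int :=
  (PySem.List.pyRange 0 (PySem.Int.floordiv (n + 3) 4 * 4) 1).map ord2land_aux

-- ===== PORT B =====
def ord2land_alt (n : Int) : List Int :=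
  (PySem.List.pyRange 0 (PySem.Int.floordiv (PySem.Int.floordiv (n + 3) 4 * 4) 4) 1).foldl
    (fun out k => out ++ [4 * k, 4 * k + 2, 4 * k + 1, 4 * k + 3]) []

-- ===== PRECONDITION & SPEC =====
def Spec_ord2land (n : Int) (out : List Int) : Prop := out = ord2land_alt n
instance (n : Int) (out : List Int) : Decidable (Spec_ord2land n out) := by unfold Spec_ord2land; infer_instance

-- ===== CLAIM (what is proved, stated in full; the proofs are below) =====
def Claim_equal_ord2land : Prop := ∀ (n : Int), Dom_ord2land n → Spec_ord2land n (ord2land n)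

-- ===== LEMMAS AND PROOFS =====
lemma ord2land_block (q : Nat) :
    PySem.List.pyRange (4 * (q : Int)) (4 * (q : Int) + 4) 1
      = [4 * (q : Int), 4 * (q : Int) + 1, 4 * (q : Int) + 2, 4 * (q : Int) + 3] := by
  rw [PySem.List.pyRange_one_cons (by omega), PySem.List.pyRange_one_cons (by omega),
      PySem.List.pyRange_one_cons (by omega), PySem.List.pyRange_one_cons (by omega),
      PySem.List.pyRange_one_eq_nil (by omega)]
  norm_num
  omega

lemma ord2land_key (q : Nat) :
    (PySem.List.pyRange 0 (4 * (q : Int)) 1).map ord2land_aux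
      = (PySem.List.pyRange 0 (q : Int) 1).foldl
          (fun out k => out ++ [4 * k, 4 * k + 2, 4 * k + 1, 4 * k + 3]) [] := by
  induction q with
  | zero => simp [PySem.List.pyRange_one_eq_nil]
  | succ q ih =>
    have h1 : PySem.List.pyRange 0 ((q : Int) + 1) 1
        = PySem.List.pyRange 0 (q : Int) 1 ++ [(q : Int)] :=
      PySem.List.pyRange_one_succ_right (by positivity)
    have h2 : PySem.List.pyRange 0 (4 * ((q : Int) + 1)) 1
        = PySem.List.pyRange 0 (4 * (q : Int)) 1
          ++ PySem.List.pyRange (4 * (q : Int)) (4 * (q : Int) + 4) 1 := by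
      rw [show 4 * ((q : Int) + 1) = 4 * (q : Int) + 4 by ring]
      exact PySem.List.pyRange_one_append 0 (4 * (q : Int)) (4 * (q : Int) + 4)
        (by positivity) (by omega)
    have e0 : ord2land_aux (4 * (q : Int)) = 4 * (q : Int) := by
      simp [ord2land_aux, show (4 * (q : Int)) % 4 = 0 by omega]
    have e1 : ord2land_aux (4 * (q : Int) + 1) = 4 * (q : Int) + 2 := by
      simp [ord2land_aux, show (4 * (q : Int) + 1) % 4 = 1 by omega]
      ring
    have e2 : ord2land_aux (4 * (q : Int) + 2) = 4 * (q : Int) + 1 := by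
      simp [ord2land_aux, show (4 * (q : Int) + 2) % 4 = 2 by omega]
      ring
    have e3 : ord2land_aux (4 * (q : Int) + 3) = 4 * (q : Int) + 3 := by
      simp [ord2land_aux, show (4 * (q : Int) + 3) % 4 = 3 by omega]
    push_cast
    rw [h2, h1, List.map_append, ih, ord2land_block, List.foldl_append]
    simp [e0, e1, e2, e3]

-- ===== VERDICT (by name: the statement is the Claim_ definition above) =====
theorem ord2land_spec : Claim_equal_ord2land := by
  intro n _
  unfold Spec_ord2land ord2land ord2land_alt
  set M := PySem.Int.floordiv (n + 3) 4 with hM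
  have hM4 : PySem.Int.floordiv (M * 4) 4 = M := by
    rw [PySem.Int.floordiv_eq_ediv_of_pos (by norm_num)]; omega
  rw [hM4]
  by_cases h : M ≤ 0
  · rw [PySem.List.pyRange_one_eq_nil (by omega : M * 4 ≤ 0),
        PySem.List.pyRange_one_eq_nil (by omega : M ≤ 0)]
    simp
  · obtain ⟨q, hq⟩ : ∃ q : Nat, M = (q : Int) :=
      ⟨M.toNat, (Int.toNat_of_nonneg (by omega)).symm⟩
    rw [hq, show (q : Int) * 4 = 4 * (q : Int) by ring]
    exact ord2land_key q
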